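-- pv_equiv track=rewrite | github.com/kacperslenzak/setu-timetable-scraper | utils.py | merge_timetables
-- ===== SOURCE A (Python) =====
-- def merge_timetables(tt1, tt2):
--     merged = {}
--
--     for d in [tt1, tt2]:
--         for group, days in d.items():
--             merged.setdefault(group, {})
--             for day, lessons in days.items():
--                 merged.setdefault(group, {}).setdefault(day, [])
--                 for lesson in lessons:
--                     # Only add if not already in list
--                     if lesson not in merged[group][day]:
--                         merged[group][day].append(lesson)
--
--     return merged
-- ===== SOURCE B (Python) =====
-- def _dedup(lessons):
--     out = []
--     for lesson in lessons:
--         if lesson not in out: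
--             out.append(lesson)
--     return out
--
--
-- def merge_timetables(tt1, tt2):
--     merged = {}
--     for group in list(tt1) + [g for g in tt2 if g not in tt1]:
--         d1 = tt1.get(group, {})
--         d2 = tt2.get(group, {})
--         day_keys = list(d1) + [d for d in d2 if d not in d1]
--         merged[group] = {day: _dedup(d1.get(day, []) + d2.get(day, []))
--                          for day in day_keys}
--     return merged
-- ===== Notes on version B (the rewrite author's own statement) =====
-- stated objective: alternative
-- what changed: A mutates one accumulator dict with nested setdefault/append passes over both inputs; B instead computes the ordered union of group keys (and per group of day keys) up front and builds each merged entry directly by dict lookups plus a dedup of the concatenated lesson lists.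
import Mathlib
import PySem

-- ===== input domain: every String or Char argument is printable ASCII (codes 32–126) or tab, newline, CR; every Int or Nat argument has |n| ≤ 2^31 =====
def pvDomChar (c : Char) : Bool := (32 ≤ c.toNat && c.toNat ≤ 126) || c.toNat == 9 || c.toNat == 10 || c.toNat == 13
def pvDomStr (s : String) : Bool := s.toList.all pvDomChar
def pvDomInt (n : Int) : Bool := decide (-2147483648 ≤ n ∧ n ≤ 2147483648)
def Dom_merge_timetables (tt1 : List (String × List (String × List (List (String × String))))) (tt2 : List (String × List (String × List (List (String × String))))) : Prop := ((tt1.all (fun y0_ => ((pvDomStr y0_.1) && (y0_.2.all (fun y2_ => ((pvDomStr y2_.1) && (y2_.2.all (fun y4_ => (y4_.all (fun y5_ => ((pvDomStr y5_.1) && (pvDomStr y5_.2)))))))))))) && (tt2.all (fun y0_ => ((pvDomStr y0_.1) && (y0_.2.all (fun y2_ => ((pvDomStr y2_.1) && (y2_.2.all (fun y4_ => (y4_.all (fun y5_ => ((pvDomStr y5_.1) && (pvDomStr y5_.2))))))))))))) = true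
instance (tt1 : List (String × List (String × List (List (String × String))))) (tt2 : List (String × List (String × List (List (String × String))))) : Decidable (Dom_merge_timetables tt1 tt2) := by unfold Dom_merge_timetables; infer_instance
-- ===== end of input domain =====

-- B merges by a different decomposition: instead of A's mutate-as-you-go double fold with setdefault,
-- B first forms the ordered union of group keys and, per group, of day keys, and builds each merged
-- entry by lookup + dedup of the concatenated lesson lists (objective: simpler/alternative, not faster).
-- Equivalence is about the RETURN value (neither program mutates its arguments).

-- first-match lookup, i.e. Python dict access on an association list (shared primitive)
def pvFind {β : Type} (L : List (String × β)) (k : String) : Option β :=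
  match L with
  | [] => none
  | p :: r => if p.1 = k then some p.2 else pvFind r k

-- Python '==' on two lesson dicts (exact for lessons with unique keys, as Pre_ requires)
def pvDictEq (a b : List (String × String)) : Bool :=
  a.length == b.length && a.all (fun p => pvFind b p.1 == some p.2)

-- Python 'lesson in list' (list membership via dict equality; shared primitive)
def pvMemLesson (l : List (String × String)) (ls : List (List (String × String))) : Bool :=
  ls.any (fun x => pvDictEq l x)

-- ===== PORT A =====
-- 'for lesson in lessons: if lesson not in cur: cur.append(lesson)'
def pvAddLesson (acc : List (List (String × String))) (l : List (String × String)) :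
    List (List (String × String)) :=
  if pvMemLesson l acc then acc else acc ++ [l]

def pvAddLessons (cur : List (List (String × String))) (lessons : List (List (String × String))) :
    List (List (String × String)) :=
  lessons.foldl pvAddLesson cur

-- m.setdefault(k, init)
def pvEnsure {β : Type} (m : List (String × β)) (k : String) (init : β) : List (String × β) :=
  if m.any (fun p => p.1 = k) then m else m ++ [(k, init)]

-- setdefault k then update the entry at k in place
def pvSetK {β γ : Type} (upd : β → γ → β) (init : β) (m : List (String × β)) (k : String) (x : γ) :
    List (String × β) :=
  (pvEnsure m k init).map (fun p => if p.1 = k then (p.1, upd p.2 x) else p)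

-- inner 'for day, lessons in days.items(): …setdefault(day, []) ; append lessons'
def pvAddDays (ds : List (String × List (List (String × String))))
    (days : List (String × List (List (String × String)))) :
    List (String × List (List (String × String))) :=
  days.foldl (fun ds p => pvSetK pvAddLessons [] ds p.1 p.2) ds

def merge_timetables (tt1 : List (String × List (String × List (List (String × String))))) (tt2 : List (String × List (String × List (List (String × String))))) : List (String × List (String × List (List (String × String)))) :=
  [tt1, tt2].foldl
    (fun m d => d.foldl (fun m p => pvSetK pvAddDays [] m p.1 p.2) m) []

-- ===== PORT B =====
-- B's _dedup helper
def pvDedup (ls : List (List (String × String))) : List (List (String × String)) :=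
  ls.foldl (fun out lesson => if pvMemLesson lesson out then out else out ++ [lesson]) []

-- Python d.get(k, dflt)
def pvGetD {β : Type} (L : List (String × β)) (k : String) (dflt : β) : β :=
  (pvFind L k).getD dflt

-- 'list(d1) + [k for k in d2 if k not in d1]'
def pvUnionKeys (k1 k2 : List String) : List String :=
  k1 ++ k2.filter (fun k => !k1.contains k)

def merge_timetables_alt (tt1 : List (String × List (String × List (List (String × String))))) (tt2 : List (String × List (String × List (List (String × String))))) : List (String × List (String × List (List (String × String)))) :=
  (pvUnionKeys (tt1.map (·.1)) (tt2.map (·.1))).map (fun group =>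
    let d1 := pvGetD tt1 group []
    let d2 := pvGetD tt2 group []
    (group, (pvUnionKeys (d1.map (·.1)) (d2.map (·.1))).map (fun day =>
      (day, pvDedup (pvGetD d1 day [] ++ pvGetD d2 day [])))))

-- ===== PRECONDITION & SPEC =====
def pvNodupKeys {β : Type} (L : List (String × β)) : Prop := (L.map (·.1)).Nodup

-- Pre_ excludes association lists with duplicate keys (at the group, day or lesson level):
-- such lists do not represent Python dicts, which always have unique keys.
def Pre_merge_timetables (tt1 : List (String × List (String × List (List (String × String))))) (tt2 : List (String × List (String × List (List (String × String))))) : Prop :=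
  pvNodupKeys tt1 ∧ pvNodupKeys tt2 ∧
  (∀ p ∈ tt1, pvNodupKeys p.2 ∧ ∀ q ∈ p.2, ∀ l ∈ q.2, pvNodupKeys l) ∧
  (∀ p ∈ tt2, pvNodupKeys p.2 ∧ ∀ q ∈ p.2, ∀ l ∈ q.2, pvNodupKeys l)

instance (tt1 : List (String × List (String × List (List (String × String))))) (tt2 : List (String × List (String × List (List (String × String))))) : Decidable (Pre_merge_timetables tt1 tt2) := by
  unfold Pre_merge_timetables pvNodupKeys; infer_instance

def pvWitness_merge_timetables : (List (String × List (String × List (List (String × String))))) × (List (String × List (String × List (List (String × String))))) :=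
  ([("G1", [("Mon", [[("time", "9"), ("room", "A")]])])],
   [("G1", [("Mon", [[("room", "A"), ("time", "9")], [("time", "10")]]), ("Tue", [])]),
    ("G2", [])])

def Spec_merge_timetables (tt1 : List (String × List (String × List (List (String × String))))) (tt2 : List (String × List (String × List (List (String × String))))) (out : List (String × List (String × List (List (String × String))))) : Prop := out = merge_timetables_alt tt1 tt2
instance (tt1 : List (String × List (String × List (List (String × String))))) (tt2 : List (String × List (String × List (List (String × String))))) (out : List (String × List (String × List (List (String × String))))) : Decidable (Spec_merge_timetables tt1 tt2 out) := by
  unfold Spec_merge_timetables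
  -- the fully composed DecidableEq instance exceeds synthInstance.maxSize, so build it stepwise
  letI h1 : DecidableEq (String × List (String × List (List (String × String)))) := instDecidableEqProd
  letI h2 : DecidableEq (List (String × List (String × List (List (String × String))))) := instDecidableEqList
  exact h2 _ _

-- ===== CLAIM (what is proved, stated in full; the proofs are below) =====
def Claim_equal_merge_timetables : Prop := ∀ (tt1 : List (String × List (String × List (List (String × String))))) (tt2 : List (String × List (String × List (List (String × String))))), Dom_merge_timetables tt1 tt2 → Pre_merge_timetables tt1 tt2 → Spec_merge_timetables tt1 tt2 (merge_timetables tt1 tt2)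

-- ===== LEMMAS AND PROOFS =====

-- apply an optional second argument to an update function
def pvApp {β γ : Type} (upd : β → γ → β) (v : β) : Option γ → β
  | none => v
  | some x => upd v x

theorem pvFind_of_mem_nodup {β : Type} {L : List (String × β)} (h : pvNodupKeys L)
    {p : String × β} (hp : p ∈ L) : pvFind L p.1 = some p.2 := by
  induction L with
  | nil => cases hp
  | cons q r ih =>
    rcases List.mem_cons.1 hp with rfl | hp'
    · simp [pvFind]
    · have hq : q.1 ≠ p.1 := by
        intro he
        have hmm : p.1 ∈ r.map (·.1) := List.mem_map.2 ⟨p, hp', rfl⟩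
        rw [← he] at hmm
        exact (List.nodup_cons.1 h).1 hmm
      simp only [pvFind, if_neg hq]
      exact ih (List.nodup_cons.1 h).2 hp'

theorem pvFind_eq_none {β : Type} {L : List (String × β)} {k : String}
    (h : ∀ p ∈ L, p.1 ≠ k) : pvFind L k = none := by
  induction L with
  | nil => rfl
  | cons q r ih =>
    simp only [pvFind, if_neg (h q (List.mem_cons_self))]
    exact ih fun p hp => h p (List.mem_cons_of_mem _ hp)

-- GENERIC setdefault-fold characterisation (used at group level and at day level)
theorem foldl_setK {β γ : Type} (upd : β → γ → β) (init : β)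
    (L : List (String × γ)) (m : List (String × β)) (hL : pvNodupKeys L) :
    L.foldl (fun m p => pvSetK upd init m p.1 p.2) m =
      m.map (fun p => (p.1, pvApp upd p.2 (pvFind L p.1)))
        ++ (L.filter (fun p => !m.any (fun q => q.1 = p.1))).map
             (fun p => (p.1, upd init p.2)) := by
  induction L generalizing m with
  | nil => simp [pvFind, pvApp]
  | cons hd tl ih =>
    obtain ⟨hhd, htl⟩ := List.nodup_cons.1 hL
    have hfindtl : pvFind tl hd.1 = none := by
      apply pvFind_eq_none
      intro p hp he
      have hmm : p.1 ∈ tl.map (·.1) := List.mem_map.2 ⟨p, hp, rfl⟩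
      rw [he] at hmm
      exact hhd hmm
    simp only [List.foldl_cons]
    rw [ih _ htl]
    by_cases hm : m.any (fun q => q.1 = hd.1)
    · -- key already present: pvEnsure is the identity, the entry is updated in place
      have hens : pvSetK upd init m hd.1 hd.2
          = m.map (fun p => if p.1 = hd.1 then (p.1, upd p.2 hd.2) else p) := by
        simp [pvSetK, pvEnsure, hm]
      rw [hens, List.map_map]
      have hmap : ∀ p : String × β,
          ((fun p => (p.1, pvApp upd p.2 (pvFind tl p.1))) ∘
            (fun p => if p.1 = hd.1 then (p.1, upd p.2 hd.2) else p)) p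
          = (p.1, pvApp upd p.2 (pvFind (hd :: tl) p.1)) := by
        intro p
        by_cases hpk : p.1 = hd.1
        · simp [Function.comp, hpk, pvFind, hfindtl, pvApp]
        · have hne : ¬ hd.1 = p.1 := fun h => hpk h.symm
          simp [Function.comp, hpk, pvFind, hne]
      rw [List.map_congr_left (fun p _ => hmap p)]
      have hkeys : ∀ p : String × γ,
          ((m.map (fun p => if p.1 = hd.1 then (p.1, upd p.2 hd.2) else p)).any
            (fun q => q.1 = p.1))
          = (m.any (fun q => q.1 = p.1)) := by
        intro p
        simp only [List.any_map]
        refine List.any_congr rfl fun q => ?_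
        by_cases hq : q.1 = hd.1 <;> simp [Function.comp, hq]
      have hfilter :
          tl.filter (fun p => !(m.map (fun p => if p.1 = hd.1 then (p.1, upd p.2 hd.2) else p)).any
              (fun q => q.1 = p.1))
          = (hd :: tl).filter (fun p => !m.any (fun q => q.1 = p.1)) := by
        rw [List.filter_congr (fun p _ => by rw [hkeys p])]
        rw [List.filter_cons_of_neg (by simp [hm])]
      rw [hfilter]
    · -- new key: pvEnsure appends (hd.1, init), which is then updated to upd init hd.2
      have hnot : ∀ q ∈ m, q.1 ≠ hd.1 := by
        intro q hq he
        exact hm (List.any_eq_true.2 ⟨q, hq, by simp [he]⟩)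
      have hmapid : m.map (fun p => if p.1 = hd.1 then (p.1, upd p.2 hd.2) else p) = m := by
        conv_rhs => rw [← List.map_id m]
        exact List.map_congr_left fun p hp => by simp [hnot p hp]
      have hens : pvSetK upd init m hd.1 hd.2 = m ++ [(hd.1, upd init hd.2)] := by
        simp only [pvSetK, pvEnsure, if_neg hm, List.map_append, hmapid]
        simp
      rw [hens, List.map_append]
      have hm1 : m.map (fun p => (p.1, pvApp upd p.2 (pvFind tl p.1)))
          = m.map (fun p => (p.1, pvApp upd p.2 (pvFind (hd :: tl) p.1))) := by
        apply List.map_congr_left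
        intro p hp
        have hne : ¬ hd.1 = p.1 := fun h => hnot p hp h.symm
        simp [pvFind, hne]
      have hkeys : ∀ p : String × γ, p ∈ tl →
          ((m ++ [(hd.1, upd init hd.2)]).any (fun q => q.1 = p.1))
          = (m.any (fun q => q.1 = p.1)) := by
        intro p hp
        have hne : hd.1 ≠ p.1 := by
          intro he
          have hmm : p.1 ∈ tl.map (·.1) := List.mem_map.2 ⟨p, hp, rfl⟩
          rw [← he] at hmm
          exact hhd hmm
        simp [List.any_append, hne]
      rw [List.filter_congr (fun p hp => by rw [hkeys p hp])]
      have hcons : (hd :: tl).filter (fun p => !m.any (fun q => q.1 = p.1))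
          = hd :: tl.filter (fun p => !m.any (fun q => q.1 = p.1)) :=
        List.filter_cons_of_pos (by simp [hm])
      rw [hm1, hcons]
      simp [pvFind, hfindtl, pvApp, List.append_assoc]

-- pvDedup of a concatenation continues A's lesson accumulation
theorem pvDedup_append (a b : List (List (String × String))) :
    pvDedup (a ++ b) = pvAddLessons (pvDedup a) b := by
  unfold pvDedup pvAddLessons pvAddLesson
  rw [List.foldl_append]

theorem pvDedup_eq_addLessons (a : List (List (String × String))) :
    pvDedup a = pvAddLessons [] a := by
  unfold pvDedup pvAddLessons pvAddLesson
  rfl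

-- keys of a map that preserves first components
theorem any_keys_map {β γ : Type} (L : List (String × β)) (f : String × β → γ) (k : String) :
    ((L.map (fun p => (p.1, f p))).any fun q => decide (q.1 = k)) = (L.map (·.1)).contains k := by
  rw [List.contains_eq_any_beq]
  simp only [List.any_map]
  refine List.any_congr rfl fun q => ?_
  simp [Function.comp, eq_comm, Bool.beq_eq_decide_eq]

theorem contains_keys_iff {β : Type} (L : List (String × β)) (k : String) :
    ((L.map (·.1)).contains k) = true ↔ ∃ p ∈ L, p.1 = k := by
  simp [eq_comm]

theorem pvFind_eq_none_of_not_contains {β : Type} {L : List (String × β)} {k : String}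
    (h : ((L.map (·.1)).contains k) = false) : pvFind L k = none := by
  apply pvFind_eq_none
  intro q hq he
  rw [← Bool.not_eq_true, contains_keys_iff] at h
  exact h ⟨q, hq, he⟩

-- the merged value of one group, in B's form (day-level instantiation of foldl_setK)
theorem entry_eq (d1 d2 : List (String × List (List (String × String))))
    (h1 : pvNodupKeys d1) (h2 : pvNodupKeys d2) :
    pvAddDays (pvAddDays [] d1) d2
      = (pvUnionKeys (d1.map (·.1)) (d2.map (·.1))).map (fun day =>
          (day, pvDedup (pvGetD d1 day [] ++ pvGetD d2 day []))) := by
  have hstep : pvAddDays (pvAddDays [] d1) d2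
      = (d1 ++ d2).foldl (fun ds p => pvSetK pvAddLessons [] ds p.1 p.2) [] := by
    simp [pvAddDays, List.foldl_append]
  rw [hstep, List.foldl_append, foldl_setK _ _ d1 [] h1, foldl_setK _ _ d2 _ h2]
  simp only [List.map_nil, List.nil_append, List.filter_congr
    (fun (p : String × List (List (String × String))) _ => by
      simp : ∀ p ∈ d1, (!(([] : List (String × List (List (String × String)))).any
        (fun q => q.1 = p.1))) = true), List.filter_true]
  rw [List.map_map]
  unfold pvUnionKeys
  rw [List.map_append, List.map_map]
  congr 1
  · -- days of d1
    apply List.map_congr_left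
    intro p hp
    have hfind1 : pvFind d1 p.1 = some p.2 := pvFind_of_mem_nodup h1 hp
    have hg1 : pvGetD d1 p.1 [] = p.2 := by simp [pvGetD, hfind1]
    simp only [Function.comp, hg1]
    cases hfd : pvFind d2 p.1 with
    | none =>
      have hg2 : pvGetD d2 p.1 [] = [] := by simp [pvGetD, hfd]
      rw [hg2, List.append_nil, pvDedup_eq_addLessons]
      rfl
    | some ls =>
      have hg2 : pvGetD d2 p.1 [] = ls := by simp [pvGetD, hfd]
      rw [hg2, pvDedup_append, pvDedup_eq_addLessons]
      rfl
  · -- new days of d2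
    rw [List.filter_congr (q := fun p => !(d1.map (·.1)).contains p.1)
          (fun p _ => by rw [any_keys_map]),
        List.filter_map, List.map_map]
    have hflt : List.filter ((fun k => !(d1.map (·.1)).contains k) ∘
          (fun p : String × List (List (String × String)) => p.1)) d2
        = List.filter (fun p => !(d1.map (·.1)).contains p.1) d2 := rfl
    rw [hflt]
    apply List.map_congr_left
    intro p hp
    have hp' : ((d1.map (·.1)).contains p.1) = false := by
      have := List.of_mem_filter hp
      simpa using this
    have hnd1 : pvFind d1 p.1 = none := pvFind_eq_none_of_not_contains hp'
    have hfind2 : pvFind d2 p.1 = some p.2 := pvFind_of_mem_nodup h2 (List.mem_of_mem_filter hp)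
    simp only [Function.comp, pvGetD, hnd1, hfind2, Option.getD_none, Option.getD_some,
      List.nil_append]
    rw [pvDedup_eq_addLessons]

-- value of pvFind lies among the entries
theorem pvFind_mem {β : Type} {L : List (String × β)} {k : String} {v : β}
    (h : pvFind L k = some v) : ∃ q ∈ L, q.1 = k ∧ q.2 = v := by
  induction L with
  | nil => simp [pvFind] at h
  | cons r s ih =>
    by_cases hr : r.1 = k
    · refine ⟨r, List.mem_cons_self, hr, ?_⟩
      simpa [pvFind, hr] using h
    · obtain ⟨q, hq, hqe⟩ := ih (by simpa [pvFind, hr] using h)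
      exact ⟨q, List.mem_cons_of_mem _ hq, hqe⟩

-- ===== VERDICT (by name: the statement is the Claim_ definition above) =====
theorem merge_timetables_spec : Claim_equal_merge_timetables := by
  intro tt1 tt2 _ hpre
  obtain ⟨h1, h2, hin1, hin2⟩ := hpre
  unfold Spec_merge_timetables
  have hA : merge_timetables tt1 tt2
      = (tt1 ++ tt2).foldl (fun m p => pvSetK pvAddDays [] m p.1 p.2) [] := by
    simp [merge_timetables, List.foldl_append]
  rw [hA, List.foldl_append, foldl_setK _ _ tt1 [] h1, foldl_setK _ _ tt2 _ h2]
  simp only [List.map_nil, List.nil_append, List.filter_congr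
    (fun (p : String × List (String × List (List (String × String)))) _ => by
      simp : ∀ p ∈ tt1, (!(([] : List (String × List (String × List (List (String × String))))).any
        (fun q => q.1 = p.1))) = true), List.filter_true]
  rw [List.map_map]
  unfold merge_timetables_alt pvUnionKeys
  rw [List.map_append, List.map_map]
  congr 1
  · -- groups of tt1
    apply List.map_congr_left
    intro p hp
    have hfind1 : pvFind tt1 p.1 = some p.2 := pvFind_of_mem_nodup h1 hp
    have hg1 : pvGetD tt1 p.1 [] = p.2 := by simp [pvGetD, hfind1]
    have hd1 : pvNodupKeys p.2 := (hin1 p hp).1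
    simp only [Function.comp, hg1]
    cases hfd : pvFind tt2 p.1 with
    | none =>
      have hg2 : pvGetD tt2 p.1 [] = [] := by simp [pvGetD, hfd]
      rw [hg2]
      have : pvApp pvAddDays (pvAddDays [] p.2) none = pvAddDays (pvAddDays [] p.2) [] := rfl
      rw [this, entry_eq _ _ hd1 (by simp [pvNodupKeys])]
      rfl
    | some d2 =>
      have hg2 : pvGetD tt2 p.1 [] = d2 := by simp [pvGetD, hfd]
      have hd2 : pvNodupKeys d2 := by
        obtain ⟨q, hq, _, he2⟩ := pvFind_mem hfd
        exact he2 ▸ (hin2 q hq).1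
      rw [hg2]
      have : pvApp pvAddDays (pvAddDays [] p.2) (some d2) = pvAddDays (pvAddDays [] p.2) d2 := rfl
      rw [this, entry_eq _ _ hd1 hd2]
      rfl
  · -- new groups of tt2
    rw [List.filter_congr (q := fun p => !(tt1.map (·.1)).contains p.1)
          (fun p _ => by rw [any_keys_map]),
        List.filter_map, List.map_map]
    have hflt : List.filter ((fun k => !(tt1.map (·.1)).contains k) ∘
          (fun p : String × List (String × List (List (String × String))) => p.1)) tt2
        = List.filter (fun p => !(tt1.map (·.1)).contains p.1) tt2 := rfl
    rw [hflt]
    apply List.map_congr_left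
    intro p hp
    have hmem := List.mem_of_mem_filter hp
    have hp' : ((tt1.map (·.1)).contains p.1) = false := by
      have := List.of_mem_filter hp
      simpa using this
    have hnd1 : pvFind tt1 p.1 = none := pvFind_eq_none_of_not_contains hp'
    have hfind2 : pvFind tt2 p.1 = some p.2 := pvFind_of_mem_nodup h2 hmem
    have hd2 : pvNodupKeys p.2 := (hin2 p hmem).1
    have hg1 : pvGetD tt1 p.1 [] = [] := by simp [pvGetD, hnd1]
    have hg2 : pvGetD tt2 p.1 [] = p.2 := by simp [pvGetD, hfind2]
    simp only [Function.comp, hg1, hg2]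
    have : (pvAddDays [] p.2 : List (String × List (List (String × String))))
        = pvAddDays (pvAddDays [] ([] : List (String × List (List (String × String))))) p.2 := rfl
    rw [this, entry_eq _ _ (by simp [pvNodupKeys]) hd2]
    rfl
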